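-- pv_equiv track=rewrite | github.com/bowen0701/alg-ds-python | alg_strongly_connected_components.py | _dfs_explore
-- ===== SOURCE A (Python) =====
-- def _previsit(v, previsited_d, clock, ccid_d, ccid):
--     clock += 1
--     previsited_d[v] = clock
--     ccid_d[v] = ccid
--     return previsited_d, clock, ccid_d, ccid
--
-- def _postvisit(v, postvisited_d, clock):
--     clock += 1
--     postvisited_d[v] = clock
--     return postvisited_d, clock
--
-- def _dfs_explore(v, graph_adj_d, visited_d,
--                  previsited_d, postvisited_d, clock, ccid_d, ccid):
--     visited_d[v] = True
--
--     previsited_d, clock, ccid_d, ccid = _previsit(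
--         v, previsited_d, clock, ccid_d, ccid)
--
--     for v_neighbor in graph_adj_d[v]:
--         if not visited_d[v_neighbor]:
--             visited_d, previsited_d, postvisited_d, clock, ccid_d, ccid = (
--                 _dfs_explore(v_neighbor, graph_adj_d, visited_d,
--                              previsited_d, postvisited_d, clock, ccid_d, ccid))
--
--     postvisited_d, clock = _postvisit(v, postvisited_d, clock)
--
--     return visited_d, previsited_d, postvisited_d, clock, ccid_d, ccid
-- ===== SOURCE B (Python) =====
-- def _dfs_explore(v, graph_adj_d, visited_d,
--                  previsited_d, postvisited_d, clock, ccid_d, ccid):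
--     # Iterative DFS with an explicit stack of (vertex, remaining-neighbors) frames.
--     # Mutates the dicts in place exactly like the recursive version.
--     visited_d[v] = True
--     clock += 1
--     previsited_d[v] = clock
--     ccid_d[v] = ccid
--     stack = [(v, list(graph_adj_d[v]))]
--     while stack:
--         u, rest = stack[-1]
--         if not rest:
--             clock += 1
--             postvisited_d[u] = clock
--             stack.pop()
--         else:
--             w = rest[0]
--             stack[-1] = (u, rest[1:])
--             if not visited_d[w]:
--                 visited_d[w] = True
--                 clock += 1
--                 previsited_d[w] = clock
--                 ccid_d[w] = ccid
--                 stack.append((w, list(graph_adj_d[w])))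
--     return visited_d, previsited_d, postvisited_d, clock, ccid_d, ccid
-- ===== Notes on version B (the rewrite author's own statement) =====
-- stated objective: alternative
-- what changed: Replaces the recursive DFS (_dfs_explore recursing into each unvisited neighbor) by an iterative loop over an explicit stack of (vertex, remaining-neighbors) frames, marking/previsiting on push and postvisiting on pop; same dicts mutated in place, same 6-tuple returned, and it raises KeyError at exactly the same lookups A does.
import Mathlib
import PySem

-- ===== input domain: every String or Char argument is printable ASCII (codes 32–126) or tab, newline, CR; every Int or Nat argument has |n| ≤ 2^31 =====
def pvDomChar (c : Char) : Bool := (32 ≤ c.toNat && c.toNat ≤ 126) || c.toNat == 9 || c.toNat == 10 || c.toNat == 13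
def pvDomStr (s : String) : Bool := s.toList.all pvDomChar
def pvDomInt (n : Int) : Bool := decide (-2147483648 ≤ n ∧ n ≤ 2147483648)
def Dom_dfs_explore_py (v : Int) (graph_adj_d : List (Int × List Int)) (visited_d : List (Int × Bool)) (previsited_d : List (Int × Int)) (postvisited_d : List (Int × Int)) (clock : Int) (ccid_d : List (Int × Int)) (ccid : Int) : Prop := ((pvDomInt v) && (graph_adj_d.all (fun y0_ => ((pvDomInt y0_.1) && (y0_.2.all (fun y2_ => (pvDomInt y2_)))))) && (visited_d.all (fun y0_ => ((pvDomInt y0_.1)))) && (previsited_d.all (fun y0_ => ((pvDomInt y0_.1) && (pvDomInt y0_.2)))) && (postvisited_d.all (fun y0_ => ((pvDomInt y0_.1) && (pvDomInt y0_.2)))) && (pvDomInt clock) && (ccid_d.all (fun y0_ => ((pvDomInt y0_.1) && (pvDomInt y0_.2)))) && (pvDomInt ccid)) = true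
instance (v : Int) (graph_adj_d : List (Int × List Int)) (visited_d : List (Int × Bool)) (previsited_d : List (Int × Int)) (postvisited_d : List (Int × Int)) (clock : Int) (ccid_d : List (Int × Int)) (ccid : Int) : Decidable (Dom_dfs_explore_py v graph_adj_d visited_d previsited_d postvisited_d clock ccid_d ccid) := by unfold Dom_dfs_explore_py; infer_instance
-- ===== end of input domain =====

-- B replaces A's recursive DFS by an explicit-stack iterative DFS (same dicts mutated in
-- place in Python; the equivalence proved here is about the returned 6-tuple — B performs
-- the same in-place mutations as A).

-- DFS state: (visited, previsited, postvisited, clock, ccid_d, ccid)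
abbrev PvSt : Type := PySem.Dict Int Bool × PySem.Dict Int Int × PySem.Dict Int Int × Int × PySem.Dict Int Int × Int

-- number of entries still mapped to False (totality measure used as fuel for port A
-- and as the termination measure of port B's loop)
def pvFc (d : PySem.Dict Int Bool) : Nat := (d.items.map Prod.snd).count false

-- ===== PORT A =====
-- _previsit (exact)
def pvPrevisit (v : Int) (pre : PySem.Dict Int Int) (clock : Int) (cc : PySem.Dict Int Int) (ccid : Int) : PySem.Dict Int Int × Int × PySem.Dict Int Int × Int :=
  (pre.insert v (clock + 1), clock + 1, cc.insert v ccid, ccid)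

-- _postvisit (exact)
def pvPostvisit (v : Int) (post : PySem.Dict Int Int) (clock : Int) : PySem.Dict Int Int × Int :=
  (post.insert v (clock + 1), clock + 1)

-- the `for v_neighbor in graph_adj_d[v]` loop of A, with `rec` the recursive call.
-- Python's `visited_d[v_neighbor]` raises KeyError on a missing key (excluded by Pre_);
-- the port reads a default of `true` there (skip), which keeps the function total.
def pvDfsList (rec : Int → PvSt → PvSt) : List Int → PvSt → PvSt
  | [], st => st
  | w :: ns, st =>
    if st.1.getD w true then pvDfsList rec ns st
    else pvDfsList rec ns (rec w st)

-- _dfs_explore, literally, with a fuel guard for totality: every recursive descent turns a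
-- False visited entry True, so recursion depth is at most pvFc + 1 and the fuel chosen in
-- dfs_explore_py below is never exhausted. Python's `graph_adj_d[v]` raises KeyError on a
-- missing key (excluded by Pre_); the port reads [] there.
def pvDfsA (g : PySem.Dict Int (List Int)) : Nat → Int → PvSt → PvSt
  | 0, _, st => st
  | fuel + 1, v, (vis, pre, post, clock, cc, ccid) =>
    let vis1 := vis.insert v true
    match pvPrevisit v pre clock cc ccid with
    | (pre1, clock1, cc1, ccid1) =>
      match pvDfsList (pvDfsA g fuel) (g.getD v []) (vis1, pre1, post, clock1, cc1, ccid1) with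
      | (vis2, pre2, post2, clock2, cc2, ccid2) =>
        match pvPostvisit v post2 clock2 with
        | (post3, clock3) => (vis2, pre2, post3, clock3, cc2, ccid2)

def dfs_explore_py (v : Int) (graph_adj_d : List (Int × List Int)) (visited_d : List (Int × Bool)) (previsited_d : List (Int × Int)) (postvisited_d : List (Int × Int)) (clock : Int) (ccid_d : List (Int × Int)) (ccid : Int) : (List (Int × Bool)) × (List (Int × Int)) × (List (Int × Int)) × Int × (List (Int × Int)) × Int :=
  let g := PySem.Dict.mk graph_adj_d
  let vis := PySem.Dict.mk visited_d
  let st := pvDfsA g (pvFc vis + 2) v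
      (vis, PySem.Dict.mk previsited_d, PySem.Dict.mk postvisited_d, clock, PySem.Dict.mk ccid_d, ccid)
  (st.1.items, st.2.1.items, st.2.2.1.items, st.2.2.2.1, st.2.2.2.2.1.items, st.2.2.2.2.2)

-- ===== PORT B =====
-- termination helpers for the stack loop
def pvSum (stack : List (Int × List Int)) : Nat := (stack.map (fun f => f.2.length)).sum + stack.length

theorem pv_count_false_replace_le (k : Int) (l : List (Int × Bool)) :
    (((l.map (fun p => if p.1 == k then (k, true) else p)).map Prod.snd).count false)
      ≤ ((l.map Prod.snd).count false) := by
  induction l with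
  | nil => simp
  | cons p l ih =>
    simp only [List.map_cons, List.count_cons]
    by_cases h : (p.1 == k) = true <;> cases hp2 : p.2 <;> simp_all <;> omega

theorem pv_count_false_replace_lt (k : Int) (l : List (Int × Bool)) (h : (k, false) ∈ l) :
    (((l.map (fun p => if p.1 == k then (k, true) else p)).map Prod.snd).count false)
      < ((l.map Prod.snd).count false) := by
  induction l with
  | nil => simp at h
  | cons p l ih =>
    simp only [List.map_cons, List.count_cons]
    rcases List.mem_cons.mp h with h1 | h1
    · subst h1
      have hle := pv_count_false_replace_le k l
      simp_all
    · have hlt := ih h1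
      by_cases hk : (p.1 == k) = true <;> cases hp2 : p.2 <;> simp_all <;> omega

theorem pvFc_insert_lt (d : PySem.Dict Int Bool) (k : Int) (h : d.getD k true = false) :
    pvFc (d.insert k true) < pvFc d := by
  have hget : d.get? k = some false := by
    rw [PySem.Dict.getD_eq_get?_getD] at h
    cases hg : d.get? k with
    | none => simp [hg] at h
    | some b => simp [hg] at h; simp [h]
  have hmem : (k, false) ∈ d.items := PySem.Dict.mem_items_of_get?_eq_some d hget
  have hcont : d.contains k = true := by
    rw [PySem.Dict.contains_eq_isSome_get?, hget]; rfl
  unfold pvFc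
  rw [PySem.Dict.items_insert, if_pos hcont]
  exact pv_count_false_replace_lt k d.items hmem

-- the while-loop of B: a stack of (vertex, remaining-neighbors) frames; previsit on push,
-- postvisit on pop. Same KeyError-avoiding defaults as port A ([] / true).
def pvRunB (g : PySem.Dict Int (List Int)) (stack : List (Int × List Int)) (st : PvSt) : PvSt :=
  match stack with
  | [] => st
  | (u, []) :: fs =>
    match st with
    | (vis, pre, post, clock, cc, ccid) =>
      pvRunB g fs (vis, pre, post.insert u (clock + 1), clock + 1, cc, ccid)
  | (u, w :: ns) :: fs =>
    if h : st.1.getD w true = true then pvRunB g ((u, ns) :: fs) st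
    else
      match st with
      | (vis, pre, post, clock, cc, ccid) =>
        pvRunB g ((w, g.getD w []) :: (u, ns) :: fs)
          (vis.insert w true, pre.insert w (clock + 1), post, clock + 1, cc.insert w ccid, ccid)
termination_by (pvFc st.1, pvSum stack)
decreasing_by
  · apply Prod.Lex.right
    simp [pvSum]
  · apply Prod.Lex.right
    simp [pvSum]
  · apply Prod.Lex.left
    have hb : vis.getD w true = false := by
      cases hx : vis.getD w true with
      | false => rfl
      | true => exact absurd hx h
    exact pvFc_insert_lt _ _ hb

def dfs_explore_py_alt (v : Int) (graph_adj_d : List (Int × List Int)) (visited_d : List (Int × Bool)) (previsited_d : List (Int × Int)) (postvisited_d : List (Int × Int)) (clock : Int) (ccid_d : List (Int × Int)) (ccid : Int) : (List (Int × Bool)) × (List (Int × Int)) × (List (Int × Int)) × Int × (List (Int × Int)) × Int :=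
  let g := PySem.Dict.mk graph_adj_d
  let vis1 := (PySem.Dict.mk visited_d).insert v true
  let clock1 := clock + 1
  let pre1 := (PySem.Dict.mk previsited_d).insert v clock1
  let cc1 := (PySem.Dict.mk ccid_d).insert v ccid
  let st := pvRunB g [(v, g.getD v [])] (vis1, pre1, PySem.Dict.mk postvisited_d, clock1, cc1, ccid)
  (st.1.items, st.2.1.items, st.2.2.1.items, st.2.2.2.1, st.2.2.2.2.1.items, st.2.2.2.2.2)

-- ===== PRECONDITION & SPEC =====
-- one expansion step of the set of vertices the DFS explores
def pvExpand (g : PySem.Dict Int (List Int)) (vis : PySem.Dict Int Bool) (v : Int) (E : List Int) : List Int :=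
  E.foldl (fun acc u =>
    (g.getD u []).foldl (fun acc2 w =>
      if w ≠ v ∧ vis.getD w true = false ∧ w ∉ acc2 then acc2 ++ [w] else acc2) acc) E

-- vertices reachable from v through initially-unvisited vertices (a fixpoint is reached
-- after at most |visited_d| expansions): exactly the vertices the Python DFS explores.
def pvReach (g : PySem.Dict Int (List Int)) (vis : PySem.Dict Int Bool) (v : Int) : List Int :=
  (pvExpand g vis v)^[vis.size + 1] [v]

-- Pre_: exactly the inputs on which Python's A returns (B raises the same KeyErrors at the
-- same lookups): every vertex the DFS explores (pvReach) has an adjacency entry, and every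
-- neighbor it inspects has a visited entry (or is v itself, which A marks first).
def Pre_dfs_explore_py (v : Int) (graph_adj_d : List (Int × List Int)) (visited_d : List (Int × Bool)) (previsited_d : List (Int × Int)) (postvisited_d : List (Int × Int)) (clock : Int) (ccid_d : List (Int × Int)) (ccid : Int) : Prop :=
  let g := PySem.Dict.mk graph_adj_d
  let vis := PySem.Dict.mk visited_d
  ∀ u ∈ pvReach g vis v, g.contains u = true ∧ ∀ w ∈ g.getD u [], w = v ∨ vis.contains w = true
instance (v : Int) (graph_adj_d : List (Int × List Int)) (visited_d : List (Int × Bool)) (previsited_d : List (Int × Int)) (postvisited_d : List (Int × Int)) (clock : Int) (ccid_d : List (Int × Int)) (ccid : Int) : Decidable (Pre_dfs_explore_py v graph_adj_d visited_d previsited_d postvisited_d clock ccid_d ccid) := by unfold Pre_dfs_explore_py; infer_instance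

def pvWitness_dfs_explore_py : Int × (List (Int × List Int)) × (List (Int × Bool)) × (List (Int × Int)) × (List (Int × Int)) × Int × (List (Int × Int)) × Int :=
  (0, [(0, [1, 2]), (1, [0, 2]), (2, [])], [(0, false), (1, false), (2, false)], [], [], 0, [], 1)

def Spec_dfs_explore_py (v : Int) (graph_adj_d : List (Int × List Int)) (visited_d : List (Int × Bool)) (previsited_d : List (Int × Int)) (postvisited_d : List (Int × Int)) (clock : Int) (ccid_d : List (Int × Int)) (ccid : Int) (out : (List (Int × Bool)) × (List (Int × Int)) × (List (Int × Int)) × Int × (List (Int × Int)) × Int) : Prop := out = dfs_explore_py_alt v graph_adj_d visited_d previsited_d postvisited_d clock ccid_d ccid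
instance (v : Int) (graph_adj_d : List (Int × List Int)) (visited_d : List (Int × Bool)) (previsited_d : List (Int × Int)) (postvisited_d : List (Int × Int)) (clock : Int) (ccid_d : List (Int × Int)) (ccid : Int) (out : (List (Int × Bool)) × (List (Int × Int)) × (List (Int × Int)) × Int × (List (Int × Int)) × Int) : Decidable (Spec_dfs_explore_py v graph_adj_d visited_d previsited_d postvisited_d clock ccid_d ccid out) := by unfold Spec_dfs_explore_py; infer_instance

-- ===== CLAIM (what is proved, stated in full; the proofs are below) =====
def Claim_equal_dfs_explore_py : Prop := ∀ (v : Int) (graph_adj_d : List (Int × List Int)) (visited_d : List (Int × Bool)) (previsited_d : List (Int × Int)) (postvisited_d : List (Int × Int)) (clock : Int) (ccid_d : List (Int × Int)) (ccid : Int), Dom_dfs_explore_py v graph_adj_d visited_d previsited_d postvisited_d clock ccid_d ccid → Pre_dfs_explore_py v graph_adj_d visited_d previsited_d postvisited_d clock ccid_d ccid → Spec_dfs_explore_py v graph_adj_d visited_d previsited_d postvisited_d clock ccid_d ccid (dfs_explore_py v graph_adj_d visited_d previsited_d postvisited_d clock ccid_d ccid)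

-- ===== LEMMAS AND PROOFS =====

theorem pvFc_insert_le (d : PySem.Dict Int Bool) (k : Int) :
    pvFc (d.insert k true) ≤ pvFc d := by
  unfold pvFc
  rw [PySem.Dict.items_insert]
  split
  · exact pv_count_false_replace_le k d.items
  · simp

-- the postvisit step on a whole state
def pvPostSt (u : Int) (st : PvSt) : PvSt :=
  (st.1, st.2.1, st.2.2.1.insert u (st.2.2.2.1 + 1), st.2.2.2.1 + 1, st.2.2.2.2.1, st.2.2.2.2.2)

theorem pvDfsA_succ (g : PySem.Dict Int (List Int)) (fuel : Nat) (v : Int) (st : PvSt) :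
    pvDfsA g (fuel + 1) v st =
      pvPostSt v (pvDfsList (pvDfsA g fuel) (g.getD v [])
        (st.1.insert v true, st.2.1.insert v (st.2.2.2.1 + 1), st.2.2.1, st.2.2.2.1 + 1,
         st.2.2.2.2.1.insert v st.2.2.2.2.2, st.2.2.2.2.2)) := by
  obtain ⟨vis, pre, post, clock, cc, ccid⟩ := st
  simp only [pvDfsA, pvPrevisit]
  obtain ⟨a, b, c, d, e, f⟩ :=
    pvDfsList (pvDfsA g fuel) (g.getD v [])
      (vis.insert v true, pre.insert v (clock + 1), post, clock + 1, cc.insert v ccid, ccid)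
  rfl

theorem pvFc_mono (g : PySem.Dict Int (List Int)) (fuel : Nat) :
    (∀ v st, pvFc (pvDfsA g fuel v st).1 ≤ pvFc st.1) ∧
    (∀ ns st, pvFc (pvDfsList (pvDfsA g fuel) ns st).1 ≤ pvFc st.1) := by
  induction fuel with
  | zero =>
    constructor
    · intro v st; simp [pvDfsA]
    · intro ns
      induction ns with
      | nil => intro st; simp [pvDfsList]
      | cons w ns ih =>
        intro st
        by_cases h : st.1.getD w true = true
        · simpa [pvDfsList, h] using ih st
        · simp only [pvDfsList, h, pvDfsA]
          simpa using ih st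
  | succ m ih =>
    have hAF : ∀ v st, pvFc (pvDfsA g (m + 1) v st).1 ≤ pvFc st.1 := by
      intro v st
      rw [pvDfsA_succ]
      calc pvFc (pvPostSt v (pvDfsList (pvDfsA g m) (g.getD v []) _)).1
          = pvFc (pvDfsList (pvDfsA g m) (g.getD v [])
              (st.1.insert v true, st.2.1.insert v (st.2.2.2.1 + 1), st.2.2.1, st.2.2.2.1 + 1,
               st.2.2.2.2.1.insert v st.2.2.2.2.2, st.2.2.2.2.2)).1 := rfl
        _ ≤ pvFc (st.1.insert v true) := ih.2 _ _
        _ ≤ pvFc st.1 := pvFc_insert_le _ _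
    refine ⟨hAF, ?_⟩
    intro ns
    induction ns with
    | nil => intro st; simp [pvDfsList]
    | cons w ns ihns =>
      intro st
      by_cases h : st.1.getD w true = true
      · simpa [pvDfsList, h] using ihns st
      · simp only [pvDfsList, h]
        exact le_trans (ihns _) (hAF w st)

theorem pvRunB_frame (g : PySem.Dict Int (List Int)) :
    ∀ fuel (ns : List Int) (u : Int) (fs : List (Int × List Int)) (st : PvSt),
      pvFc st.1 < fuel →
      pvRunB g ((u, ns) :: fs) st = pvRunB g fs (pvPostSt u (pvDfsList (pvDfsA g fuel) ns st)) := by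
  intro fuel
  induction fuel with
  | zero => intro ns u fs st h; omega
  | succ m ih =>
    intro ns
    induction ns with
    | nil =>
      intro u fs st h
      obtain ⟨vis, pre, post, clock, cc, ccid⟩ := st
      rw [pvRunB]
      rfl
    | cons w ns ihns =>
      intro u fs st h
      by_cases hv : st.1.getD w true = true
      · have hl : pvDfsList (pvDfsA g (m + 1)) (w :: ns) st = pvDfsList (pvDfsA g (m + 1)) ns st := by
          simp [pvDfsList, hv]
        rw [hl]
        obtain ⟨vis, pre, post, clock, cc, ccid⟩ := st
        rw [pvRunB]
        simp only [hv, dite_true]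
        exact ihns u fs _ h
      · have hb : st.1.getD w true = false := by
          cases hx : st.1.getD w true with
          | false => rfl
          | true => exact absurd hx hv
        have hlt : pvFc (st.1.insert w true) < pvFc st.1 := pvFc_insert_lt _ _ hb
        have hl : pvDfsList (pvDfsA g (m + 1)) (w :: ns) st
            = pvDfsList (pvDfsA g (m + 1)) ns (pvDfsA g (m + 1) w st) := by
          simp [pvDfsList, hb]
        rw [hl]
        obtain ⟨vis, pre, post, clock, cc, ccid⟩ := st
        rw [pvRunB]
        simp only [hb, Bool.false_eq_true, dite_false]
        -- descend into w via the outer IH at fuel m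
        have h1 := ih (g.getD w []) w ((u, ns) :: fs)
          (vis.insert w true, pre.insert w (clock + 1), post, clock + 1, cc.insert w ccid, ccid)
          (show pvFc (vis.insert w true) < m by
            have h' : pvFc vis < m + 1 := h
            have hlt' : pvFc (vis.insert w true) < pvFc vis := hlt
            omega)
        rw [h1]
        have h2 : pvPostSt w (pvDfsList (pvDfsA g m) (g.getD w [])
            (vis.insert w true, pre.insert w (clock + 1), post, clock + 1, cc.insert w ccid, ccid))
            = pvDfsA g (m + 1) w (vis, pre, post, clock, cc, ccid) := by
          rw [pvDfsA_succ]
        rw [h2]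
        -- finish the remaining neighbors via the inner IH
        have hmono : pvFc (pvDfsA g (m + 1) w (vis, pre, post, clock, cc, ccid)).1
            ≤ pvFc (vis, pre, post, clock, cc, ccid).1 := (pvFc_mono g (m + 1)).1 w _
        exact ihns u fs _ (lt_of_le_of_lt hmono (show pvFc vis < m + 1 from h))

theorem pvA_eq_B (g : PySem.Dict Int (List Int)) (v : Int) (vis : PySem.Dict Int Bool)
    (pre post : PySem.Dict Int Int) (clock : Int) (cc : PySem.Dict Int Int) (ccid : Int) :
    pvDfsA g (pvFc vis + 2) v (vis, pre, post, clock, cc, ccid) =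
    pvRunB g [(v, g.getD v [])]
      (vis.insert v true, pre.insert v (clock + 1), post, clock + 1, cc.insert v ccid, ccid) := by
  have hlt : pvFc ((vis.insert v true, pre.insert v (clock + 1), post, clock + 1,
      cc.insert v ccid, ccid) : PvSt).1 < pvFc vis + 1 := by
    have := pvFc_insert_le vis v
    simp
    omega
  rw [pvRunB_frame g (pvFc vis + 1) (g.getD v []) v [] _ hlt]
  rw [show pvFc vis + 2 = (pvFc vis + 1) + 1 from rfl, pvDfsA_succ]
  rw [pvRunB]

-- ===== VERDICT (by name: the statement is the Claim_ definition above) =====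
theorem dfs_explore_py_spec : Claim_equal_dfs_explore_py := by
  intro v graph_adj_d visited_d previsited_d postvisited_d clock ccid_d ccid _ _
  simp only [Spec_dfs_explore_py, dfs_explore_py, dfs_explore_py_alt]
  rw [pvA_eq_B]
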